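-- pv_equiv track=rewrite | github.com/adamswbrown/ukfoodfacts | scrapers/gyg_au.py | _clean_category
-- ===== SOURCE A (Python) =====
-- def _clean_category(raw):
--     """Clean up the category string from the table header."""
--     if not raw:
--         return "Menu"
--     # Remove multiline junk and extra whitespace
--     cat = " ".join(raw.split())
--     # Strip location-specific notes in parentheses
--     if "(GYG" in cat:
--         cat = cat[:cat.index("(GYG")].strip()
--     # Remove column header text that leaked in
--     for suffix in ["SERVE SIZE", "ENERGY"]:
--         if suffix in cat:
--             cat = cat[:cat.index(suffix)].strip()
--     return cat if cat else "Menu"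
-- ===== SOURCE B (Python) =====
-- def _clean_category(raw):
--     """Clean up the category string from the table header."""
--     if not raw:
--         return "Menu"
--     cat = " ".join(raw.split())
--     # Single left-to-right scan: cut once at the earliest position where any
--     # marker (location note or leaked column header) starts.
--     markers = ("(GYG", "SERVE SIZE", "ENERGY")
--     cut = None
--     for j in range(len(cat)):
--         if any(cat.startswith(m, j) for m in markers):
--             cut = j
--             break
--     if cut is not None:
--         cat = cat[:cut].strip()
--     return cat if cat else "Menu"
-- ===== Notes on version B (the rewrite author's own statement) =====
-- stated objective: alternative
-- what changed: Replaces A's sequential cut-at-marker-then-rescan chain (an in/index/slice/strip round per marker) with one left-to-right scan that finds the earliest position where any marker starts and slices/strips once.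
import Mathlib
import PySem

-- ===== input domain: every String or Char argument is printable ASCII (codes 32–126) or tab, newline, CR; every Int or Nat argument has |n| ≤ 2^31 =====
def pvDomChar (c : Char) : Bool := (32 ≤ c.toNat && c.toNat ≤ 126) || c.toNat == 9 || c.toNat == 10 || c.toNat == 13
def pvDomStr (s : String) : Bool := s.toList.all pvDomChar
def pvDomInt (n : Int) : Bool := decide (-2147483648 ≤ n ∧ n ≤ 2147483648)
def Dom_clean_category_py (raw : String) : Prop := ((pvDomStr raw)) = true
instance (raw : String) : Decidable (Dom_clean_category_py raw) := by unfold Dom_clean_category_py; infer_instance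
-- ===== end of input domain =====

-- B replaces A's sequential cut-at-marker-then-rescan chain by one left-to-right scan
-- that finds the earliest marker start and slices/strips once (objective: alternative).

-- ===== PORT A =====
-- 'cat.index(sub)' is ported as PySem.Str.find: exact here because every call is guarded by 'sub in cat'.
def clean_category_py (raw : String) : String :=
  if raw == "" then "Menu"
  else
    let cat := PySem.Str.join " " (PySem.Str.split₀ raw)
    let cat := if PySem.Str.isIn "(GYG" cat
      then PySem.Str.strip (PySem.Str.slice cat none (some (PySem.Str.find cat "(GYG")))
      else cat
    let cat := ["SERVE SIZE", "ENERGY"].foldl (fun cat suffix =>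
      if PySem.Str.isIn suffix cat
      then PySem.Str.strip (PySem.Str.slice cat none (some (PySem.Str.find cat suffix)))
      else cat) cat
    if cat == "" then "Menu" else cat

-- ===== PORT B =====
def pvMarkers : List (List Char) := ["(GYG".toList, "SERVE SIZE".toList, "ENERGY".toList]

-- the scan 'next j in range(len(cat)) with any(cat.startswith(m, j) for m in markers)'
def pvScan (M : List (List Char)) : List Char → Option Nat
  | [] => none
  | c :: rest =>
    if M.any (fun m => m.isPrefixOf (c :: rest)) then some 0
    else (pvScan M rest).map (· + 1)

def clean_category_py_alt (raw : String) : String :=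
  if raw == "" then "Menu"
  else
    let cat := (PySem.Str.join " " (PySem.Str.split₀ raw)).toList
    let cat := match pvScan pvMarkers cat with
      | some j => PySem.Chars.strip (cat.take j)
      | none => cat
    if cat.isEmpty then "Menu" else String.ofList cat

-- ===== PRECONDITION & SPEC =====
def Spec_clean_category_py (raw : String) (out : String) : Prop := out = clean_category_py_alt raw
instance (raw : String) (out : String) : Decidable (Spec_clean_category_py raw out) := by unfold Spec_clean_category_py; infer_instance

-- ===== CLAIM (what is proved, stated in full; the proofs are below) =====
def Claim_equal_clean_category_py : Prop := ∀ (raw : String), Dom_clean_category_py raw → Spec_clean_category_py raw (clean_category_py raw)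

-- ===== LEMMAS AND PROOFS =====

-- A's one cut step, on the char-list side
def cutOne (cat m : List Char) : List Char :=
  if PySem.Chars.isIn m cat then
    PySem.Chars.strip (PySem.Chars.slice cat none (some (PySem.Chars.find cat m)))
  else cat

-- B's result after the scan, on the char-list side
def minCut (M : List (List Char)) (cs : List Char) : List Char :=
  match pvScan M cs with
  | some j => PySem.Chars.strip (cs.take j)
  | none => cs

-- does any marker of M start at position j of cs?
def matchAt (M : List (List Char)) (cs : List Char) (j : Nat) : Bool :=
  M.any (fun m => m.isPrefixOf (cs.drop j))

lemma matchAt_nil (M : List (List Char)) (hne : ∀ m ∈ M, m ≠ []) (i : Nat) :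
    matchAt M [] i = false := by
  simp only [matchAt, List.drop_nil, List.any_eq_false]
  intro m hm
  simp [List.isPrefixOf_iff_prefix, List.prefix_nil, hne m hm]

lemma matchAt_cons_succ (M : List (List Char)) (c : Char) (rest : List Char) (i : Nat) :
    matchAt M (c :: rest) (i + 1) = matchAt M rest i := by
  simp [matchAt]

lemma scan_eq_none_iff (M : List (List Char)) (hne : ∀ m ∈ M, m ≠ []) (cs : List Char) :
    pvScan M cs = none ↔ ∀ i, matchAt M cs i = false := by
  induction cs with
  | nil => simp [pvScan, matchAt_nil M hne]
  | cons c rest ih =>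
    by_cases h : M.any (fun m => m.isPrefixOf (c :: rest)) = true
    · simp only [pvScan, h, if_true]
      constructor
      · intro hc; exact absurd hc (by simp)
      · intro hall
        have h0 := hall 0
        simp only [matchAt, List.drop_zero] at h0
        rw [h0] at h
        cases h
    · simp only [pvScan, if_neg h, Option.map_eq_none_iff, ih]
      constructor
      · intro hall i
        cases i with
        | zero => simpa [matchAt] using h
        | succ i => rw [matchAt_cons_succ]; exact hall i
      · intro hall i
        have := hall (i + 1)
        rwa [matchAt_cons_succ] at this

lemma scan_eq_some_iff (M : List (List Char)) (hne : ∀ m ∈ M, m ≠ []) (cs : List Char) (j : Nat) :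
    pvScan M cs = some j ↔ (matchAt M cs j = true ∧ ∀ i < j, matchAt M cs i = false) := by
  induction cs generalizing j with
  | nil =>
    simp only [pvScan]
    constructor
    · intro hc; cases hc
    · rintro ⟨hj, -⟩
      rw [matchAt_nil M hne] at hj; cases hj
  | cons c rest ih =>
    by_cases h : M.any (fun m => m.isPrefixOf (c :: rest)) = true
    · simp only [pvScan, h, if_true]
      constructor
      · rintro hj
        injection hj with hj; subst hj
        exact ⟨by simpa [matchAt] using h, fun i hi => absurd hi (Nat.not_lt_zero i)⟩
      · rintro ⟨hj, hmin⟩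
        cases j with
        | zero => rfl
        | succ j =>
          have h0 := hmin 0 (Nat.succ_pos j)
          simp only [matchAt, List.drop_zero] at h0
          rw [h0] at h; cases h
    · simp only [pvScan, if_neg h]
      constructor
      · intro hj
        rcases Option.map_eq_some_iff.mp hj with ⟨j', hj', rfl⟩
        rcases (ih j').mp hj' with ⟨hm, hmin⟩
        refine ⟨by rwa [matchAt_cons_succ], ?_⟩
        intro i hi
        cases i with
        | zero => simpa [matchAt] using h
        | succ i => rw [matchAt_cons_succ]; exact hmin i (by omega)
      · rintro ⟨hj, hmin⟩
        cases j with
        | zero =>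
          simp only [matchAt, List.drop_zero] at hj
          exact absurd hj h
        | succ j =>
          rw [matchAt_cons_succ] at hj
          have : pvScan M rest = some j := by
            refine (ih j).mpr ⟨hj, fun i hi => ?_⟩
            have := hmin (i + 1) (by omega)
            rwa [matchAt_cons_succ] at this
          rw [this]; rfl

lemma lstrip_eq_drop (x : List Char) :
    PySem.Chars.lstrip x = x.drop (x.takeWhile PySem.Chars.isspace).length := by
  rw [PySem.Chars.lstrip]
  nth_rewrite 3 [← List.takeWhile_append_dropWhile (p := PySem.Chars.isspace) (l := x)]
  rw [List.drop_left]

lemma isspace_of_lt_leadLen (x : List Char) (q : Nat)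
    (hq : q < (x.takeWhile PySem.Chars.isspace).length) (h : q < x.length) :
    PySem.Chars.isspace x[q] = true := by
  have hpre := List.takeWhile_prefix (l := x) (p := PySem.Chars.isspace)
  have hmem := List.mem_takeWhile_imp (List.getElem_mem hq)
  rwa [List.IsPrefix.getElem hpre hq] at hmem

lemma leadLen_le_of_not_isspace (x : List Char) (q : Nat) (h : q < x.length)
    (hns : PySem.Chars.isspace x[q] = false) :
    (x.takeWhile PySem.Chars.isspace).length ≤ q := by
  by_contra hlt
  rw [isspace_of_lt_leadLen x q (by omega) h] at hns
  cases hns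

lemma rstrip_prefix (x : List Char) : PySem.Chars.rstrip x <+: x := by
  rw [PySem.Chars.rstrip]
  have h := List.dropWhile_suffix (l := x.reverse) (p := PySem.Chars.isspace)
  have := List.reverse_prefix.mpr h
  simpa using this

lemma lt_rstrip_length (x : List Char) (q : Nat) (h : q < x.length)
    (hns : PySem.Chars.isspace x[q] = false) :
    q < (PySem.Chars.rstrip x).length := by
  rw [PySem.Chars.rstrip]
  have hlen : (List.dropWhile PySem.Chars.isspace x.reverse).length
      = x.reverse.length - (x.reverse.takeWhile PySem.Chars.isspace).length := by
    rw [← PySem.Chars.lstrip, lstrip_eq_drop, List.length_drop]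
  rw [List.length_reverse, hlen]
  have hq' : x.length - 1 - q < x.reverse.length := by simp; omega
  have hns' : PySem.Chars.isspace (x.reverse[x.length - 1 - q]'hq') = false := by
    rw [Eq.symm (List.getElem_eq_getElem_reverse (by omega))]
    exact hns
  have := leadLen_le_of_not_isspace x.reverse _ hq' hns'
  simp only [List.length_reverse] at *
  omega

lemma strip_drop_of_ws (x : List Char) (L : Nat)
    (hL : ∀ q, q < L → (h2 : q < x.length) → PySem.Chars.isspace x[q] = true) :
    PySem.Chars.strip (x.drop L) = PySem.Chars.strip x := by
  have h1 : (x.take L).dropWhile PySem.Chars.isspace = [] := by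
    rw [List.dropWhile_eq_nil_iff]
    intro c hc
    rcases List.mem_iff_getElem.mp hc with ⟨i, hi, rfl⟩
    have hi' : i < x.length := by simp at hi; omega
    rw [List.getElem_take]
    exact hL i (by simp at hi; omega) hi'
  have h2 : PySem.Chars.lstrip (x.drop L) = PySem.Chars.lstrip x := by
    rw [PySem.Chars.lstrip, PySem.Chars.lstrip]
    conv_rhs => rw [← List.take_append_drop L x]
    rw [List.dropWhile_append, h1]
    simp
  rw [PySem.Chars.strip, PySem.Chars.strip, h2]

lemma headI_eq_getElem (m : List Char) (h2 : 0 < m.length) : m.headI = m[0] := by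
  cases m with
  | nil => simp at h2
  | cons c t => rfl

lemma getLastI_eq_getElem (m : List Char) (h2 : m.length - 1 < m.length) :
    m.getLastI = m[m.length - 1] := by
  rw [List.getLastI_eq_getLast?_getD, List.getLast?_eq_getElem?]
  simp [List.getElem?_eq_getElem h2]

lemma prefix_take_eq (x y : List Char) (n : Nat) (h : x <+: y) (hn : n ≤ x.length) :
    x.take n = y.take n := by
  rw [List.prefix_iff_eq_take.mp h, List.take_take, min_eq_left hn]

lemma occ_getElem (x m : List Char) (p i : Nat) (h : m <+: x.drop p) (hi : i < m.length) :
    ∃ hpi : p + i < x.length, x[p + i] = m[i] := by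
  have hlen : m.length ≤ x.length - p := by
    have := h.length_le
    simpa using this
  have hp : p ≤ x.length := by
    by_contra hp
    have : x.drop p = [] := List.drop_eq_nil_of_le (by omega)
    rw [this, List.prefix_nil] at h
    subst h; simp at hi
  have hpi : p + i < x.length := by omega
  refine ⟨hpi, ?_⟩
  have hge := List.IsPrefix.getElem h hi
  rw [hge, List.getElem_drop]

-- an occurrence of a marker with a non-space last char survives rstrip
lemma prefix_drop_rstrip (x m : List Char) (p : Nat) (hm : m ≠ [])
    (hlast : PySem.Chars.isspace m.getLastI = false) (h : m <+: x.drop p) :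
    m <+: (PySem.Chars.rstrip x).drop p := by
  have hmlen : 0 < m.length := List.length_pos_iff.mpr hm
  rcases occ_getElem x m p (m.length - 1) h (by omega) with ⟨hpi, hval⟩
  have hns : PySem.Chars.isspace x[p + (m.length - 1)] = false := by
    rw [hval, ← getLastI_eq_getElem m (by omega)]
    exact hlast
  have hK := lt_rstrip_length x _ hpi hns
  -- rstrip x = x.take K with p + m.length ≤ K
  have hrs : PySem.Chars.rstrip x = x.take (PySem.Chars.rstrip x).length :=
    List.prefix_iff_eq_take.mp (rstrip_prefix x)
  rw [hrs, List.drop_take]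
  rw [List.prefix_take_iff]
  exact ⟨h, by omega⟩

-- the step lemma: one sequential cut followed by a scan over the rest equals the scan over all
lemma step_lemma (m : List Char) (M : List (List Char)) (cs : List Char)
    (hm : m ≠ []) (hM : ∀ m' ∈ M, m' ≠ [] ∧ PySem.Chars.isspace m'.headI = false ∧
          PySem.Chars.isspace m'.getLastI = false ∧ m.headI ∉ m') :
    minCut M (cutOne cs m) = minCut (m :: M) cs := by
  have hneM : ∀ m' ∈ M, m' ≠ [] := fun m' hm' => (hM m' hm').1
  have hneMm : ∀ m' ∈ m :: M, m' ≠ [] := by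
    intro m' hm'
    rcases List.mem_cons.mp hm' with rfl | hm'
    · exact hm
    · exact hneM m' hm'
  by_cases hin : PySem.Chars.isIn m cs = true
  · -- m occurs in cs: A cuts at f = first occurrence of m
    have hinf := (PySem.Chars.isIn_iff_infix m cs).mp hin
    have hfind0 := (PySem.Chars.find_nonneg_iff cs m).mpr hinf
    obtain ⟨hf1, hf2⟩ := PySem.Chars.find_spec (s := cs) (sub := m) hfind0
    have hcut : cutOne cs m = PySem.Chars.strip (cs.take (PySem.Chars.find cs m).toNat) := by
      rw [cutOne, if_pos hin, PySem.Chars.slice_eq_listSlice, PySem.List.slice_to cs hfind0]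
    set f := (PySem.Chars.find cs m).toNat with hfdef
    have hflen : f ≤ cs.length := by
      have := PySem.Chars.find_le_length cs m
      omega
    set t := cs.take f with htdef
    have htlen : t.length = f := by
      rw [htdef, List.length_take]
      omega
    set L := (t.takeWhile PySem.Chars.isspace).length with hLdef
    have hLf : L ≤ f := by
      have := (List.takeWhile_prefix (l := t) (p := PySem.Chars.isspace)).length_le
      omega
    set u := t.drop L with hudef
    have hseg : PySem.Chars.strip t = PySem.Chars.rstrip u := by
      rw [PySem.Chars.strip, lstrip_eq_drop, ← hLdef, ← hudef]
    set seg := PySem.Chars.rstrip u with hsegdef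
    have hulen : u.length = f - L := by
      rw [hudef, List.length_drop, htlen]
    have hseglen : seg.length ≤ f - L := by
      have h1 : seg.length ≤ u.length := by
        rw [hsegdef]
        exact (rstrip_prefix u).length_le
      omega
    -- any marker occurrence in seg at p is an occurrence in cs at L + p, with L + p < f
    have hback : ∀ m' p, m' ≠ [] → m' <+: seg.drop p → m' <+: cs.drop (L + p) ∧ L + p < f := by
      intro m' p hm'ne hpref
      have h1 : seg.drop p <+: u.drop p := by
        rw [hsegdef]
        exact (rstrip_prefix u).drop p
      have h2 : u.drop p = t.drop (L + p) := by rw [hudef, List.drop_drop]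
      have h3 : t.drop (L + p) <+: cs.drop (L + p) := by
        rw [htdef]
        exact (List.take_prefix f cs).drop (L + p)
      have hocc : m' <+: cs.drop (L + p) := (hpref.trans h1).trans (h2 ▸ h3)
      have hplen : p < seg.length := by
        have hle := hpref.length_le
        have hml : 0 < m'.length := List.length_pos_iff.mpr hm'ne
        simp only [List.length_drop] at hle
        omega
      exact ⟨hocc, by omega⟩
    cases hscan : pvScan (m :: M) cs with
    | none =>
      exfalso
      have hall := (scan_eq_none_iff (m :: M) hneMm cs).mp hscan f
      have hmf : matchAt (m :: M) cs f = true := by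
        simp only [matchAt, List.any_cons]
        rw [List.isPrefixOf_iff_prefix.mpr hf1]
        simp
      exact absurd hmf (by simp [hall])
    | some j =>
      obtain ⟨hmatchj, hminj⟩ := (scan_eq_some_iff (m :: M) hneMm cs j).mp hscan
      have hMCtop : minCut (m :: M) cs = PySem.Chars.strip (cs.take j) := by
        unfold minCut
        rw [hscan]
      have hjf : j ≤ f := by
        by_contra hc
        have hmf : matchAt (m :: M) cs f = true := by
          simp only [matchAt, List.any_cons]
          rw [List.isPrefixOf_iff_prefix.mpr hf1]
          simp
        have h0 := hminj f (by omega)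
        exact absurd hmf (by simp [h0])
      have hminM : ∀ p, L + p < j → matchAt M seg p = false := by
        intro p hp
        by_contra hc
        simp only [Bool.not_eq_false, matchAt, List.any_eq_true] at hc
        obtain ⟨m', hm'M, hm'pref⟩ := hc
        have hocc := (hback m' p (hneM m' hm'M) (List.isPrefixOf_iff_prefix.mp hm'pref)).1
        have hmm : matchAt (m :: M) cs (L + p) = true := by
          simp only [matchAt, List.any_cons, Bool.or_eq_true, List.any_eq_true]
          exact Or.inr ⟨m', hm'M, List.isPrefixOf_iff_prefix.mpr hocc⟩
        have h0 := hminj (L + p) hp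
        exact absurd hmm (by simp [h0])
      rcases Nat.lt_or_ge j f with hjlt | hjge
      · -- j < f: the scan's winner is some m' ∈ M; seg still contains it at j - L
        have hmj : ¬ m <+: cs.drop j := hf2 j (by omega)
        have hm'ex : ∃ m' ∈ M, m' <+: cs.drop j := by
          simp only [matchAt, List.any_cons, Bool.or_eq_true, List.any_eq_true] at hmatchj
          rcases hmatchj with h | ⟨m', hm'M, hm'p⟩
          · exact absurd (List.isPrefixOf_iff_prefix.mp h) hmj
          · exact ⟨m', hm'M, List.isPrefixOf_iff_prefix.mp hm'p⟩
        obtain ⟨m', hm'M, hm'occ⟩ := hm'ex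
        obtain ⟨hm'ne, hm'h, hm'l, hm'nh⟩ := hM m' hm'M
        have hm'len : 0 < m'.length := List.length_pos_iff.mpr hm'ne
        obtain ⟨hjlen, hjval⟩ := occ_getElem cs m' j 0 hm'occ hm'len
        have hcsj : PySem.Chars.isspace (cs[j]'(by omega)) = false := by
          have e0 : cs[j + 0]'(by omega) = m'[0] := hjval
          simp only [Nat.add_zero] at e0
          rw [e0, ← headI_eq_getElem m' hm'len]
          exact hm'h
        have hLj : L ≤ j := by
          have htj : t[j]'(by omega) = cs[j]'(by omega) := by
            simp [htdef, List.getElem_take]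
          have := leadLen_le_of_not_isspace t j (by omega) (by rw [htj]; exact hcsj)
          omega
        have hfit : j + m'.length ≤ f := by
          by_contra hc
          have hif : f - j < m'.length := by omega
          obtain ⟨hfl, hfval⟩ := occ_getElem cs m' j (f - j) hm'occ hif
          obtain ⟨hfl2, hfval2⟩ := occ_getElem cs m f 0 hf1 (List.length_pos_iff.mpr hm)
          apply hm'nh
          rw [headI_eq_getElem m (List.length_pos_iff.mpr hm), ← hfval2]
          simp only [Nat.add_zero]
          have e1 : cs[f]'(by omega) = m'[f - j] := by
            rw [← hfval]
            congr 1
            omega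
          rw [e1]
          exact List.getElem_mem hif
        -- m' occurs in seg at j - L
        have hoccu : m' <+: u.drop (j - L) := by
          have h1 : u.drop (j - L) = t.drop j := by
            rw [hudef, List.drop_drop]
            congr 1
            omega
          have h2 : t.drop j = (cs.drop j).take (f - j) := by
            rw [htdef, List.drop_take]
          rw [h1, h2, List.prefix_take_iff]
          exact ⟨hm'occ, by omega⟩
        have hoccseg : m' <+: seg.drop (j - L) := by
          rw [hsegdef]
          exact prefix_drop_rstrip u m' (j - L) hm'ne hm'l hoccu
        have hscanseg : pvScan M seg = some (j - L) := by
          rw [scan_eq_some_iff M hneM seg (j - L)]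
          constructor
          · simp only [matchAt, List.any_eq_true]
            exact ⟨m', hm'M, List.isPrefixOf_iff_prefix.mpr hoccseg⟩
          · intro p hp
            exact hminM p (by omega)
        have hMCseg : minCut M (cutOne cs m) = PySem.Chars.strip (seg.take (j - L)) := by
          rw [hcut, hseg]
          unfold minCut
          rw [hscanseg]
        rw [hMCseg, hMCtop]
        -- strip (seg.take (j - L)) = strip (cs.take j)
        have hsegfit : j - L + m'.length ≤ seg.length := by
          have h1 := hoccseg.length_le
          simp only [List.length_drop] at h1
          omega
        have h1 : seg.take (j - L) = u.take (j - L) := by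
          apply prefix_take_eq seg u (j - L) _ (by omega)
          rw [hsegdef]
          exact rstrip_prefix u
        have h2 : u.take (j - L) = (cs.take j).drop L := by
          rw [hudef, List.take_drop]
          congr 1
          rw [htdef, List.take_take]
          congr 1
          omega
        have h3 : PySem.Chars.strip ((cs.take j).drop L) = PySem.Chars.strip (cs.take j) := by
          apply strip_drop_of_ws
          intro q hq hq2
          have h4 : PySem.Chars.isspace (t[q]'(by omega)) = true :=
            isspace_of_lt_leadLen t q (by omega) (by omega)
          have h5 : t[q]'(by omega) = (cs.take j)[q]'hq2 := by
            simp [htdef, List.getElem_take]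
          rw [← h5]
          exact h4
        rw [h1, h2, h3]
      · -- j = f: nothing of M survives in seg; both sides are strip (cs.take f)
        have hjeq : j = f := by omega
        have hscanseg : pvScan M seg = none := by
          rw [scan_eq_none_iff M hneM seg]
          intro p
          by_contra hc
          simp only [Bool.not_eq_false, matchAt, List.any_eq_true] at hc
          obtain ⟨m', hm'M, hm'pref⟩ := hc
          have hb := hback m' p (hneM m' hm'M) (List.isPrefixOf_iff_prefix.mp hm'pref)
          have h0 := hminj (L + p) (by omega)
          have hmm : matchAt (m :: M) cs (L + p) = true := by
            simp only [matchAt, List.any_cons, Bool.or_eq_true, List.any_eq_true]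
            exact Or.inr ⟨m', hm'M, List.isPrefixOf_iff_prefix.mpr hb.1⟩
          exact absurd hmm (by simp [h0])
        have hMCseg : minCut M (cutOne cs m) = PySem.Chars.strip t := by
          rw [hcut, hseg]
          unfold minCut
          rw [hscanseg]
        rw [hMCseg, hMCtop, hjeq, htdef]
  · -- m does not occur at all: the cut is a no-op and m never matches in the scan
    have hnm : ∀ i, m.isPrefixOf (cs.drop i) = false := by
      intro i
      by_contra hc
      simp only [Bool.not_eq_false] at hc
      have hex : ∃ j, m <+: cs.drop j := ⟨i, List.isPrefixOf_iff_prefix.mp hc⟩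
      rw [PySem.Chars.exists_prefix_drop_iff_isIn m cs] at hex
      exact hin hex
    have hcut : cutOne cs m = cs := by rw [cutOne, if_neg hin]
    have hmeq : ∀ i, matchAt (m :: M) cs i = matchAt M cs i := by
      intro i
      simp only [matchAt, List.any_cons, hnm i, Bool.false_or]
    rw [hcut]
    cases hscan : pvScan (m :: M) cs with
    | none =>
      have hall := (scan_eq_none_iff (m :: M) hneMm cs).mp hscan
      have hn : pvScan M cs = none := by
        rw [scan_eq_none_iff M hneM cs]
        intro i
        rw [← hmeq i]
        exact hall i
      unfold minCut
      rw [hn, hscan]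
    | some j =>
      obtain ⟨hmj, hminj⟩ := (scan_eq_some_iff (m :: M) hneMm cs j).mp hscan
      have hs : pvScan M cs = some j := by
        rw [scan_eq_some_iff M hneM cs j]
        exact ⟨by rwa [← hmeq j], fun i hi => by rw [← hmeq i]; exact hminj i hi⟩
      unfold minCut
      rw [hs, hscan]

lemma seq_eq_min (M : List (List Char))
    (h1 : ∀ m ∈ M, m ≠ [] ∧ PySem.Chars.isspace m.headI = false ∧ PySem.Chars.isspace m.getLastI = false)
    (h2 : List.Pairwise (fun m m' => m.headI ∉ m') M) :
    ∀ cs, M.foldl cutOne cs = minCut M cs := by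
  induction M with
  | nil =>
    intro cs
    have : pvScan [] cs = none := by
      rw [scan_eq_none_iff [] (by simp) cs]
      intro i
      simp [matchAt]
    simp [minCut, this]
  | cons m M ih =>
    intro cs
    have hmem : ∀ m' ∈ M, m' ≠ [] ∧ PySem.Chars.isspace m'.headI = false ∧
        PySem.Chars.isspace m'.getLastI = false ∧ m.headI ∉ m' := by
      intro m' hm'
      obtain ⟨a, b, c⟩ := h1 m' (List.mem_cons_of_mem m hm')
      exact ⟨a, b, c, (List.pairwise_cons.mp h2).1 m' hm'⟩
    rw [List.foldl_cons,
        ih (fun m' hm' => h1 m' (List.mem_cons_of_mem m hm')) (List.pairwise_cons.mp h2).2,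
        step_lemma m M cs (h1 m (List.mem_cons_self)).1 hmem]

-- the String-level cut of port A computes cutOne on toList
lemma strCut_toList (x mstr : String) :
    (if PySem.Str.isIn mstr x
      then PySem.Str.strip (PySem.Str.slice x none (some (PySem.Str.find x mstr)))
      else x).toList = cutOne x.toList mstr.toList := by
  rw [cutOne, PySem.Str.isIn, PySem.Str.strip, PySem.Str.slice, PySem.Str.find]
  by_cases h : PySem.Chars.isIn mstr.toList x.toList = true
  · rw [if_pos h, if_pos h]
    simp
  · rw [if_neg h, if_neg h]

lemma final_glue (sa : String) (lb : List Char) (h : sa.toList = lb) :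
    (if sa == "" then "Menu" else sa) = (if lb.isEmpty then "Menu" else String.ofList lb) := by
  by_cases hc : lb.isEmpty = true
  · rw [if_pos hc]
    have hnil : lb = [] := by simpa [List.isEmpty_iff] using hc
    have hsa : sa = "" := String.toList_inj.mp (by rw [h, hnil]; rfl)
    rw [if_pos (by rw [hsa]; rfl)]
  · rw [if_neg hc]
    have hnil : lb ≠ [] := by simpa [List.isEmpty_iff] using hc
    have hsa : sa ≠ "" := fun he => hnil (by rw [← h, he]; rfl)
    rw [if_neg (by simpa using hsa), ← h, String.ofList_toList]

-- ===== VERDICT (by name: the statement is the Claim_ definition above) =====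
theorem clean_category_py_spec : Claim_equal_clean_category_py := by
  intro raw _
  unfold Spec_clean_category_py clean_category_py clean_category_py_alt
  by_cases hraw : raw == ""
  · rw [if_pos hraw, if_pos hraw]
  · rw [if_neg hraw, if_neg hraw]
    refine final_glue _ _ ?_
    show _ = minCut pvMarkers (PySem.Str.join " " (PySem.Str.split₀ raw)).toList
    rw [← seq_eq_min pvMarkers (by decide) (by decide)]
    simp only [pvMarkers, List.foldl_cons, List.foldl_nil]
    rw [← strCut_toList (PySem.Str.join " " (PySem.Str.split₀ raw)) "(GYG",
        ← strCut_toList _ "SERVE SIZE", ← strCut_toList _ "ENERGY"]
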